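-- pv_equiv track=rewrite | github.com/sanurb/MisionTic2022 | ciclo1_python/RETO-Semana-3-S4ntiag0/registro.py | validar_clave
-- ===== SOURCE A (Python) =====
-- def validar_clave(clave):
--     """ Valida que la clave contenga AL MENOS uno de
--     los simbolos obligatorios
--
--     Args:
--       clave(str)
--
--     Return:
--       bool
--
--     Examples
--     --------
--     >>> validar_clave('clave123_')
--     True
--
--     >>> validar_clave('clave123')
--     False
--     """
--     val_clave = False
--     simbolos_obligatorios = ["_", "?", "&"]
--     # Usamos una list comprehension para comprobar
--     # entiendase ele como elemento
--     comprobacion = [ele for ele in simbolos_obligatorios if (ele in clave)]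
--     # comprobamos si la cadena clave contiene algun simbolos obligatorio
--     if bool(comprobacion) == False:
--         val_clave = False
--     else:
--         val_clave = True
--     return val_clave
-- ===== SOURCE B (Python) =====
-- def validar_clave(clave):
--     simbolos = {'_', '?', '&'}
--     for c in clave:
--         if c in simbolos:
--             return True
--     return False
-- ===== Notes on version B (the rewrite author's own statement) =====
-- stated objective: idiomatic
-- what changed: B scans the password's characters once and tests each against a symbol set, instead of A's list comprehension that scans the password once per mandatory symbol and then converts the filtered list to bool.
import Mathlib
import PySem

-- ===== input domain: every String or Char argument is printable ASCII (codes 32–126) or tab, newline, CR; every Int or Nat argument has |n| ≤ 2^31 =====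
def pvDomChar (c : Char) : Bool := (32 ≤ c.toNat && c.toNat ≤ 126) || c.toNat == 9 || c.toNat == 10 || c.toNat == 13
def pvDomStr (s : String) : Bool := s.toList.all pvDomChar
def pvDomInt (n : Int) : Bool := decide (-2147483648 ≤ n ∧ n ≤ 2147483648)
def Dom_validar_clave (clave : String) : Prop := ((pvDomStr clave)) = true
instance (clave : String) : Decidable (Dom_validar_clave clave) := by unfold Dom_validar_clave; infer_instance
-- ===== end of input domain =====

-- B scans the password's characters once against a symbol set instead of A's
-- per-symbol substring scans; objective: idiomatic single pass.

-- ===== PORT A =====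
def validar_clave (clave : String) : Bool :=
  let _val_clave := false
  let simbolos_obligatorios : List String := ["_", "?", "&"]
  let comprobacion := simbolos_obligatorios.filter (fun ele => PySem.Str.isIn ele clave)
  if (decide (comprobacion ≠ [])) == false then false else true

-- ===== PORT B =====
def validar_clave_alt (clave : String) : Bool :=
  let simbolos := PySem.Set.ofList ['_', '?', '&']
  clave.toList.any (fun c => PySem.Set.contains simbolos c)

-- ===== PRECONDITION & SPEC =====
def Spec_validar_clave (clave : String) (out : Bool) : Prop := out = validar_clave_alt clave
instance (clave : String) (out : Bool) : Decidable (Spec_validar_clave clave out) := by unfold Spec_validar_clave; infer_instance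

-- ===== CLAIM (what is proved, stated in full; the proofs are below) =====
def Claim_equal_validar_clave : Prop := ∀ (clave : String), Dom_validar_clave clave → Spec_validar_clave clave (validar_clave clave)

-- ===== LEMMAS AND PROOFS =====

-- a one-character string is an infix exactly when the character occurs
theorem singleton_infix_iff_mem {c : Char} {l : List Char} : [c] <:+: l ↔ c ∈ l := by
  constructor
  · intro h; exact h.sublist.mem (List.mem_singleton_self c)
  · intro h
    obtain ⟨pre, suf, rfl⟩ := List.append_of_mem h
    exact ⟨pre, suf, by simp⟩

-- ===== VERDICT (by name: the statement is the Claim_ definition above) =====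
theorem validar_clave_spec : Claim_equal_validar_clave := by
  intro clave _
  unfold Spec_validar_clave validar_clave validar_clave_alt
  rw [Bool.eq_iff_iff]
  simp only [PySem.Str.isIn_eq]
  by_cases h1 : '_' ∈ clave.toList <;> by_cases h2 : '?' ∈ clave.toList <;>
    by_cases h3 : '&' ∈ clave.toList <;>
    simp [PySem.Chars.isIn_iff_infix, singleton_infix_iff_mem,
      h1, h2, h3, PySem.Set.mem_ofList, List.any_eq_true] <;>
    first
      | exact ⟨'_', h1, by simp⟩
      | exact ⟨'?', h2, by simp⟩
      | exact ⟨'&', h3, by simp⟩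
      | exact fun c hc => ⟨fun h => h1 (h ▸ hc), fun h => h2 (h ▸ hc), fun h => h3 (h ▸ hc)⟩
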